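-- pv_equiv track=rewrite | github.com/b-chase/bcoj-euler | solutions/solved/problem51.py | sub_combos
-- ===== SOURCE A (Python) =====
-- def sub_combos(seq:list) -> list[list]:
--     # permutes through the given sequence, returning all sub-combinations
--     if len(seq)==1:
--         return [seq]
--     output = [[seq[0]]]
--     for sub in sub_combos(seq[1:]):
--         output.append([seq[0], *sub])
--         if sub:
--             output.append(sub)
--     return output
-- ===== SOURCE B (Python) =====
-- def sub_combos(seq):
--     # iterative right-to-left build of the same recurrence
--     current = []
--     for elem in reversed(seq):
--         new = [[elem]]
--         for sub in current:
--             new.append([elem, *sub])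
--             new.append(sub)
--         current = new
--     return current
-- ===== Notes on version B (the rewrite author's own statement) =====
-- stated objective: alternative
-- what changed: Replaces A's recursion on the tail by an explicit iterative right-to-left loop that rebuilds the result list bottom-up, dropping the always-true nonemptiness test on sub.
-- crash fix: On the empty list A raises IndexError at its first element access; B's loop never starts and it returns the empty list. — e.g. on sub_combos([]): A raises IndexError, B returns []
import Mathlib
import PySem

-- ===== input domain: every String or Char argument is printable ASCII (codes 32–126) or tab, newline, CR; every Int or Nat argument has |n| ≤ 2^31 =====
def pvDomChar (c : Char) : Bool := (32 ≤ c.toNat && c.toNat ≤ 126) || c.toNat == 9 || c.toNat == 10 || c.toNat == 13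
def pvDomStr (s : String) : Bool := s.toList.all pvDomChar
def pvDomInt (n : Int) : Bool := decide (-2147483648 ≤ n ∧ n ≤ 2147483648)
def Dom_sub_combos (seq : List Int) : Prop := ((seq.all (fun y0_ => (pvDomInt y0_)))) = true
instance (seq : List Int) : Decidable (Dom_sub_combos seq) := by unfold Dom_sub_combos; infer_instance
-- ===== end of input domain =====

-- B replaces A's recursion by an iterative right-to-left build of the same recurrence (objective: alternative decomposition).


-- ===== PORT A =====
def sub_combos : List Int → List (List Int)
  | [] => []          -- Python A raises IndexError at its first element access here; [] is excluded by Pre_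
  | x :: rest =>
    if (x :: rest).length == 1 then [x :: rest]
    else (sub_combos rest).foldl
      (fun output sub =>
        (output ++ [x :: sub]) ++ (if sub.isEmpty then [] else [sub]))
      [[x]]

-- ===== PORT B =====
def sub_combos_alt (seq : List Int) : List (List Int) :=
  seq.reverse.foldl
    (fun current elem =>
      current.foldl (fun new sub => (new ++ [elem :: sub]) ++ [sub]) [[elem]])
    []

-- ===== PRECONDITION & SPEC =====
-- Pre_ excludes only the empty list, on which Python A raises IndexError at its first element access.
def Pre_sub_combos (seq : List Int) : Prop := seq ≠ []
instance (seq : List Int) : Decidable (Pre_sub_combos seq) := by unfold Pre_sub_combos; infer_instance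
def pvWitness_sub_combos : List Int := ([1, 2, 3])
-- On the empty list A raises IndexError while B naturally returns the empty list of combinations.
def Raises_sub_combos (seq : List Int) : Prop := seq = []
instance (seq : List Int) : Decidable (Raises_sub_combos seq) := by unfold Raises_sub_combos; infer_instance
def pvRaiseWitness_sub_combos : List Int := ([])
def pvRaiseWitnessOut_sub_combos : List (List Int) := []
def Spec_sub_combos (seq : List Int) (out : List (List Int)) : Prop := out = sub_combos_alt seq
instance (seq : List Int) (out : List (List Int)) : Decidable (Spec_sub_combos seq out) := by unfold Spec_sub_combos; infer_instance

-- ===== CLAIM (what is proved, stated in full; the proofs are below) =====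
def Claim_equal_sub_combos : Prop := ∀ (seq : List Int), Dom_sub_combos seq → Pre_sub_combos seq → Spec_sub_combos seq (sub_combos seq)
def Claim_raises_sub_combos : Prop := (∀ (seq : List Int), Dom_sub_combos seq → Raises_sub_combos seq → ¬ Pre_sub_combos seq) ∧ (Dom_sub_combos (pvRaiseWitness_sub_combos) ∧ Raises_sub_combos (pvRaiseWitness_sub_combos) ∧ sub_combos_alt (pvRaiseWitness_sub_combos) = pvRaiseWitnessOut_sub_combos)

-- ===== LEMMAS AND PROOFS =====

-- B's inner loop in flatMap form
lemma alt_step_eq (cur : List (List Int)) (x : Int) :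
    cur.foldl (fun new sub => (new ++ [x :: sub]) ++ [sub]) [[x]]
      = [[x]] ++ cur.flatMap (fun sub => [x :: sub] ++ [sub]) := by
  have := PySem.List.foldl_append_eq_flatMap
    (l := cur) (acc := [[x]]) (g := fun sub => [x :: sub] ++ [sub])
  simpa [List.append_assoc] using this

-- peeling one element off B's outer loop
lemma alt_cons (x : Int) (rest : List Int) :
    sub_combos_alt (x :: rest)
      = (sub_combos_alt rest).foldl (fun new sub => (new ++ [x :: sub]) ++ [sub]) [[x]] := by
  simp [sub_combos_alt, List.foldl_append]

-- every combination A produces is nonempty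
lemma sub_combos_ne_nil (seq : List Int) : ∀ s ∈ sub_combos seq, s ≠ [] := by
  induction seq with
  | nil => simp [sub_combos]
  | cons x rest ih =>
    intro s hs
    by_cases h1 : rest = []
    · subst h1; simp [sub_combos] at hs; simp [hs]
    · rw [sub_combos] at hs
      have hl : ((x :: rest).length == 1) = false := by
        cases rest with
        | nil => exact absurd rfl h1
        | cons b t => simp [List.length]
      rw [hl] at hs
      simp only [Bool.false_eq_true, if_false] at hs
      simp only [List.append_assoc] at hs
      rw [PySem.List.foldl_append_eq_flatMap
        (l := sub_combos rest) (acc := [[x]])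
        (g := fun sub => [x :: sub] ++ (if sub.isEmpty then [] else [sub]))] at hs
      rcases List.mem_append.1 hs with h | h
      · simp at h; simp [h]
      · rcases List.mem_flatMap.1 h with ⟨sub, hsub, hmem⟩
        have hne := ih sub hsub
        simp [hne] at hmem
        rcases hmem with h | h <;> simp [h, hne]

lemma main_eq (seq : List Int) (h : seq ≠ []) : sub_combos seq = sub_combos_alt seq := by
  induction seq with
  | nil => exact absurd rfl h
  | cons x rest ih =>
    by_cases h1 : rest = []
    · subst h1; simp [sub_combos, sub_combos_alt]
    · rw [sub_combos]
      have hl : ((x :: rest).length == 1) = false := by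
        cases rest with
        | nil => exact absurd rfl h1
        | cons b t => simp [List.length]
      rw [hl]
      simp only [Bool.false_eq_true, if_false]
      simp only [List.append_assoc]
      rw [PySem.List.foldl_append_eq_flatMap
        (l := sub_combos rest) (acc := [[x]])
        (g := fun sub => [x :: sub] ++ (if sub.isEmpty then [] else [sub]))]
      rw [alt_cons, alt_step_eq, ih h1]
      congr 1
      apply List.flatMap_congr
      intro sub hsub
      have hne := sub_combos_ne_nil rest sub (by rw [ih h1]; exact hsub)
      simp [hne]

-- ===== VERDICT (by name: the statement is the Claim_ definition above) =====
theorem sub_combos_spec : Claim_equal_sub_combos := by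
  intro seq _ hpre
  unfold Spec_sub_combos
  exact main_eq seq hpre

@[simp] theorem sub_combos_raises : Claim_raises_sub_combos := by
  unfold Claim_raises_sub_combos
  exact ⟨fun seq _ hr => by simp [Pre_sub_combos, Raises_sub_combos] at *; exact hr, by decide⟩
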